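-- pv_equiv track=rewrite | github.com/Saieiei/P2-PR-Reviewer-Recommendation | retrieval_gcbert_by_prid.py | split_hunks
-- ===== SOURCE A (Python) =====
-- def split_hunks(diff: str) -> list[str]: #
--     """Return each @@ … @@ hunk as a separate string (header line included)."""
--     hunks, cur = [], [] #
--     for ln in diff.splitlines(): #
--         if ln.startswith("@@"): #
--             if cur: #
--                 hunks.append("\n".join(cur)) #
--             cur = [ln] #
--         else: #
--             cur.append(ln) #
--     if cur: #
--         hunks.append("\n".join(cur)) #
--     return [h for h in hunks if h.strip()] #
-- ===== SOURCE B (Python) =====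
-- def split_hunks(diff: str) -> list[str]:
--     """Return each @@ ... @@ hunk as a separate string (header line included)."""
--     lines = diff.splitlines()
--     hunks = []
--     i, n = 0, len(lines)
--     while i < n:
--         j = i + 1
--         while j < n and not lines[j].startswith("@@"):
--             j += 1
--         hunks.append("\n".join(lines[i:j]))
--         i = j
--     return [h for h in hunks if h.strip()]
-- ===== Notes on version B (the rewrite author's own statement) =====
-- stated objective: alternative
-- what changed: Replaces the accumulator fold (flush cur on each hunk-header line) by an index/span scan: from each segment start, scan forward to the next hunk-header line and slice that whole segment out at once; no cur/hunks accumulator state.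
import Mathlib
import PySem

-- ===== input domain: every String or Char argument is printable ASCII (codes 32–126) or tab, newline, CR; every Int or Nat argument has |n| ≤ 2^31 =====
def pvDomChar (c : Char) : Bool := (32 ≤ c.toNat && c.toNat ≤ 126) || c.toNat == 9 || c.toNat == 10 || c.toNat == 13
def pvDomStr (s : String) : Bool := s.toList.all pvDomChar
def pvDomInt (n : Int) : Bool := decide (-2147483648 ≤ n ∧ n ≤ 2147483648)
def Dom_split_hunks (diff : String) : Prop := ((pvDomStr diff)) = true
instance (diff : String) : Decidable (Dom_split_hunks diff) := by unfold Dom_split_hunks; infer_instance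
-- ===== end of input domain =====

-- B replaces A's accumulator fold (flush the current hunk on each hunk-header line) by a span
-- scan that slices each segment out whole (head line + following body lines); same O(n) cost.

-- ===== PORT A =====
-- one loop iteration of A: state (hunks, cur)
def splitHunksStep (st : List String × List String) (ln : String) : List String × List String :=
  if PySem.Str.startswith ln "@@" then
    (if st.2 ≠ [] then st.1 ++ [PySem.Str.join "\n" st.2] else st.1, [ln])
  else
    (st.1, st.2 ++ [ln])

def split_hunks (diff : String) : List String :=
  let st := (PySem.Str.splitlines diff).foldl splitHunksStep ([], [])
  let hunks := if st.2 ≠ [] then st.1 ++ [PySem.Str.join "\n" st.2] else st.1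
  hunks.filter (fun h => PySem.Str.strip h ≠ "")

-- ===== PORT B =====
-- B's outer while loop: each step takes the segment head and scans (inner while = span)
-- to the next boundary line, emitting the slice lines[i:j] in one piece
def splitSegs : List String → List (List String)
  | [] => []
  | l :: ls =>
    (l :: ls.takeWhile (fun x => ¬ PySem.Str.startswith x "@@")) ::
      splitSegs (ls.dropWhile (fun x => ¬ PySem.Str.startswith x "@@"))
termination_by ls => ls.length
decreasing_by
  exact Nat.lt_succ_of_le (List.length_dropWhile_le _ _)

def split_hunks_alt (diff : String) : List String :=
  ((splitSegs (PySem.Str.splitlines diff)).map (PySem.Str.join "\n")).filter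
    (fun h => PySem.Str.strip h ≠ "")

-- ===== PRECONDITION & SPEC =====
def Spec_split_hunks (diff : String) (out : List String) : Prop := out = split_hunks_alt diff
instance (diff : String) (out : List String) : Decidable (Spec_split_hunks diff out) := by unfold Spec_split_hunks; infer_instance

-- ===== CLAIM (what is proved, stated in full; the proofs are below) =====
def Claim_equal_split_hunks : Prop := ∀ (diff : String), Dom_split_hunks diff → Spec_split_hunks diff (split_hunks diff)

-- ===== LEMMAS AND PROOFS =====

-- grouping with an open current segment, as A's fold maintains it
def collectSegs (cur : List String) : List String → List (List String)
  | [] => [cur]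
  | l :: ls =>
    if PySem.Str.startswith l "@@" then cur :: collectSegs [l] ls
    else collectSegs (cur ++ [l]) ls

lemma collectSegs_eq_splitSegs (ls : List String) :
    ∀ cur : List String,
      collectSegs cur ls =
        (cur ++ ls.takeWhile (fun x => ¬ PySem.Str.startswith x "@@")) ::
          splitSegs (ls.dropWhile (fun x => ¬ PySem.Str.startswith x "@@")) := by
  induction ls with
  | nil =>
    intro cur
    simp only [List.takeWhile_nil, List.dropWhile_nil]
    rw [splitSegs]
    simp [collectSegs]
  | cons l ls ih =>
    intro cur
    by_cases h : PySem.Chars.startswith l.toList ['@', '@'] = true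
    · have ht : List.takeWhile (fun x => ¬ PySem.Str.startswith x "@@") (l :: ls) = [] := by
        simp [h]
      have hd : List.dropWhile (fun x => ¬ PySem.Str.startswith x "@@") (l :: ls) = l :: ls := by
        simp [h]
      rw [ht, hd, splitSegs]
      simp [collectSegs, h, ih [l]]
    · have ht : List.takeWhile (fun x => ¬ PySem.Str.startswith x "@@") (l :: ls) =
          l :: List.takeWhile (fun x => ¬ PySem.Str.startswith x "@@") ls := by
        simp [h]
      have hd : List.dropWhile (fun x => ¬ PySem.Str.startswith x "@@") (l :: ls) =
          List.dropWhile (fun x => ¬ PySem.Str.startswith x "@@") ls := by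
        simp [h]
      rw [ht, hd]
      simp [collectSegs, h, ih (cur ++ [l]), List.append_assoc]

lemma foldl_step_eq (ls : List String) :
    ∀ (hunks cur : List String), cur ≠ [] →
      (if (ls.foldl splitHunksStep (hunks, cur)).2 ≠ [] then
        (ls.foldl splitHunksStep (hunks, cur)).1 ++
          [PySem.Str.join "\n" (ls.foldl splitHunksStep (hunks, cur)).2]
       else (ls.foldl splitHunksStep (hunks, cur)).1) =
        hunks ++ (collectSegs cur ls).map (PySem.Str.join "\n") := by
  induction ls with
  | nil => intro hunks cur hc; simp [collectSegs, hc]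
  | cons l ls ih =>
    intro hunks cur hc
    rw [List.foldl_cons]
    by_cases h : PySem.Chars.startswith l.toList ['@', '@'] = true
    · have hstep : splitHunksStep (hunks, cur) l =
          (hunks ++ [PySem.Str.join "\n" cur], [l]) := by
        simp [splitHunksStep, h, hc]
      rw [hstep, ih (hunks ++ [PySem.Str.join "\n" cur]) [l] (by simp), collectSegs]
      simp [h, List.append_assoc]
    · have hstep : splitHunksStep (hunks, cur) l = (hunks, cur ++ [l]) := by
        simp [splitHunksStep, h]
      rw [hstep, ih hunks (cur ++ [l]) (by simp), collectSegs]
      simp [h]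

lemma hunks_eq_segs (lines : List String) :
    (if (lines.foldl splitHunksStep ([], [])).2 ≠ [] then
      (lines.foldl splitHunksStep ([], [])).1 ++
        [PySem.Str.join "\n" (lines.foldl splitHunksStep ([], [])).2]
     else (lines.foldl splitHunksStep ([], [])).1) =
      (splitSegs lines).map (PySem.Str.join "\n") := by
  cases lines with
  | nil => rw [splitSegs]; simp
  | cons l ls =>
    have hstep : splitHunksStep ([], []) l = ([], [l]) := by
      simp [splitHunksStep]
    have := foldl_step_eq ls ([] : List String) [l] (by simp)
    simp only [List.foldl_cons, hstep] at *
    rw [this, collectSegs_eq_splitSegs]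
    rw [splitSegs]
    simp

-- ===== VERDICT (by name: the statement is the Claim_ definition above) =====
theorem split_hunks_spec : Claim_equal_split_hunks := by
  intro diff _
  show List.filter (fun h => decide (PySem.Str.strip h ≠ ""))
      (if (List.foldl splitHunksStep ([], []) (PySem.Str.splitlines diff)).2 ≠ [] then
        (List.foldl splitHunksStep ([], []) (PySem.Str.splitlines diff)).1 ++
          [PySem.Str.join "\n" (List.foldl splitHunksStep ([], []) (PySem.Str.splitlines diff)).2]
       else (List.foldl splitHunksStep ([], []) (PySem.Str.splitlines diff)).1) =
      split_hunks_alt diff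
  rw [hunks_eq_segs]
  rfl
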